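-- pv_equiv track=rewrite | github.com/pypi-data/pypi-mirror-400 | packages/docs2epub/docs2epub-0.1.2-py3-none-any.whl/docs2epub/pandoc_epub2.py | _summarize_pandoc_warnings
-- ===== SOURCE A (Python) =====
-- def _summarize_pandoc_warnings(stderr: str) -> str:
--   warnings = [line for line in stderr.splitlines() if line.startswith("[WARNING]")]
--   if not warnings:
--     return ""
--
--   resource = [w for w in warnings if "Could not fetch resource" in w]
--   duplicate = [w for w in warnings if "Duplicate identifier" in w]
--
--   parts: list[str] = []
--   parts.append(f"pandoc warnings: {len(warnings)} (use -v to see full output)")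
--   if duplicate:
--     parts.append(f"- Duplicate identifier: {len(duplicate)} (usually safe; affects internal anchors)")
--   if resource:
--     parts.append(
--       f"- Missing resources: {len(resource)} (some images may be dropped; use --keep-images/-v to inspect)"
--     )
--
--   return "\n".join(parts)
-- ===== SOURCE B (Python) =====
-- def _summarize_pandoc_warnings(stderr: str) -> str:
--     # Single pass over the lines with three integer counters instead of
--     # building three intermediate lists.
--     total = 0
--     duplicate = 0
--     resource = 0
--     for line in stderr.splitlines():
--         if line.startswith("[WARNING]"):
--             total += 1
--             if "Duplicate identifier" in line:
--                 duplicate += 1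
--             if "Could not fetch resource" in line:
--                 resource += 1
--     if total == 0:
--         return ""
--     parts = [f"pandoc warnings: {total} (use -v to see full output)"]
--     if duplicate:
--         parts.append(f"- Duplicate identifier: {duplicate} (usually safe; affects internal anchors)")
--     if resource:
--         parts.append(
--             f"- Missing resources: {resource} (some images may be dropped; use --keep-images/-v to inspect)"
--         )
--     return "\n".join(parts)
-- ===== Notes on version B (the rewrite author's own statement) =====
-- stated objective: simpler
-- what changed: Replaces the three list comprehensions (one filter pass plus two substring-scan passes over the warning list) with a single loop over the lines that maintains three integer counters, building no intermediate lists.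
import Mathlib
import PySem

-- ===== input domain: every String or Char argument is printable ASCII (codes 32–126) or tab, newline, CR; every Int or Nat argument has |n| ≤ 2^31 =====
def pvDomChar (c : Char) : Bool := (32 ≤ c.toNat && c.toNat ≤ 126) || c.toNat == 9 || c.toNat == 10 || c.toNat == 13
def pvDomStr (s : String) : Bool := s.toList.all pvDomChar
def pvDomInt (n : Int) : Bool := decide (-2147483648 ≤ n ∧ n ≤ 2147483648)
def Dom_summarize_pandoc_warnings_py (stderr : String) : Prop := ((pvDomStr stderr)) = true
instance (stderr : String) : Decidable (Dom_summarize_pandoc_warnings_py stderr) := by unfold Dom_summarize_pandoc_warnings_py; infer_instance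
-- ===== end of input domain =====

-- B replaces A's three list comprehensions with a single counting loop over the lines (simpler: one pass, three integer counters, no intermediate lists).


-- ===== PORT A =====
def summarize_pandoc_warnings_py (stderr : String) : String :=
  let warnings := (PySem.Str.splitlines stderr).filter
    (fun line => PySem.Str.startswith line "[WARNING]")
  if warnings.isEmpty then ""
  else
    let resource := warnings.filter (fun w => PySem.Str.isIn "Could not fetch resource" w)
    let duplicate := warnings.filter (fun w => PySem.Str.isIn "Duplicate identifier" w)
    let parts : List String :=
      ["pandoc warnings: " ++ PySem.Int.toStr (warnings.length : Int) ++
        " (use -v to see full output)"]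
    let parts := if duplicate.isEmpty then parts else
      parts ++ ["- Duplicate identifier: " ++ PySem.Int.toStr (duplicate.length : Int) ++
        " (usually safe; affects internal anchors)"]
    let parts := if resource.isEmpty then parts else
      parts ++ ["- Missing resources: " ++ PySem.Int.toStr (resource.length : Int) ++
        " (some images may be dropped; use --keep-images/-v to inspect)"]
    PySem.Str.join "\n" parts

-- ===== PORT B =====
-- one pass over the lines, three integer counters
def summarize_pandoc_warnings_py_alt (stderr : String) : String :=
  let counts : Int × Int × Int := (PySem.Str.splitlines stderr).foldl
    (fun acc line =>
      if PySem.Str.startswith line "[WARNING]" then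
        (acc.1 + 1,
         (if PySem.Str.isIn "Duplicate identifier" line then acc.2.1 + 1 else acc.2.1),
         (if PySem.Str.isIn "Could not fetch resource" line then acc.2.2 + 1 else acc.2.2))
      else acc)
    (0, 0, 0)
  let total := counts.1
  let duplicate := counts.2.1
  let resource := counts.2.2
  if total == 0 then ""
  else
    let parts : List String :=
      ["pandoc warnings: " ++ PySem.Int.toStr total ++ " (use -v to see full output)"]
    let parts := if duplicate == 0 then parts else
      parts ++ ["- Duplicate identifier: " ++ PySem.Int.toStr duplicate ++
        " (usually safe; affects internal anchors)"]
    let parts := if resource == 0 then parts else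
      parts ++ ["- Missing resources: " ++ PySem.Int.toStr resource ++
        " (some images may be dropped; use --keep-images/-v to inspect)"]
    PySem.Str.join "\n" parts

-- ===== PRECONDITION & SPEC =====
def Spec_summarize_pandoc_warnings_py (stderr : String) (out : String) : Prop := out = summarize_pandoc_warnings_py_alt stderr
instance (stderr : String) (out : String) : Decidable (Spec_summarize_pandoc_warnings_py stderr out) := by unfold Spec_summarize_pandoc_warnings_py; infer_instance

-- ===== CLAIM (what is proved, stated in full; the proofs are below) =====
def Claim_equal_summarize_pandoc_warnings_py : Prop := ∀ (stderr : String), Dom_summarize_pandoc_warnings_py stderr → Spec_summarize_pandoc_warnings_py stderr (summarize_pandoc_warnings_py stderr)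

-- ===== LEMMAS AND PROOFS =====

-- the single pass of B computes exactly the three counts A takes as list lengths
lemma pv_fold_counts (p q r : String → Bool) (lines : List String) (t d r0 : Int) :
    lines.foldl
      (fun (acc : Int × Int × Int) line =>
        if p line then
          (acc.1 + 1,
           (if q line then acc.2.1 + 1 else acc.2.1),
           (if r line then acc.2.2 + 1 else acc.2.2))
        else acc)
      (t, d, r0)
    = (t + (lines.countP p : Int),
       d + (lines.countP (fun l => p l && q l) : Int),
       r0 + (lines.countP (fun l => p l && r l) : Int)) := by
  induction lines generalizing t d r0 with
  | nil => simp [List.countP]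
  | cons x xs ih =>
    simp only [List.foldl_cons, List.countP_cons]
    split_ifs with h1 h2 h3 h4 h5 <;>
      first
        | (rw [ih]; simp only [Prod.mk.injEq]; refine ⟨by omega, by omega, by omega⟩)
        | simp_all

theorem pv_main : ∀ (stderr : String),
    summarize_pandoc_warnings_py stderr = summarize_pandoc_warnings_py_alt stderr := by
  intro stderr
  unfold summarize_pandoc_warnings_py summarize_pandoc_warnings_py_alt
  rw [pv_fold_counts]
  simp only [zero_add]
  set lines := PySem.Str.splitlines stderr with hlines
  have hcountW : ∀ (q : String → Bool),
      ((lines.filter (fun l => PySem.Str.startswith l "[WARNING]")).filter q).length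
        = lines.countP (fun l => PySem.Str.startswith l "[WARNING]" && q l) := by
    intro q
    rw [← List.countP_eq_length_filter, List.countP_filter]
    congr 1
    funext l
    exact Bool.and_comm _ _
  have hlen : (lines.filter (fun line => PySem.Str.startswith line "[WARNING]")).length
      = lines.countP (fun line => PySem.Str.startswith line "[WARNING]") :=
    List.countP_eq_length_filter.symm
  have hAq : ∀ (q : String → Bool),
      ((lines.filter (fun l => PySem.Str.startswith l "[WARNING]")).filter q).isEmpty = true
        ↔ lines.countP (fun l => PySem.Str.startswith l "[WARNING]" && q l) = 0 := by
    intro q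
    rw [List.isEmpty_iff, ← List.length_eq_zero_iff, hcountW q]
  by_cases hw : lines.countP (fun line => PySem.Str.startswith line "[WARNING]") = 0
  · have hA : (lines.filter (fun line => PySem.Str.startswith line "[WARNING]")).isEmpty = true := by
      rw [List.isEmpty_iff, ← List.length_eq_zero_iff, hlen]; exact hw
    have hB : (((lines.countP (fun l => PySem.Str.startswith l "[WARNING]") : Int)) == 0) = true := by
      rw [hw]; rfl
    rw [if_pos hA, if_pos hB]
  · have hA : ¬ (lines.filter (fun line => PySem.Str.startswith line "[WARNING]")).isEmpty = true := by
      rw [List.isEmpty_iff, ← List.length_eq_zero_iff, hlen]; exact hw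
    have hB : ¬ (((lines.countP (fun l => PySem.Str.startswith l "[WARNING]") : Int)) == 0) = true :=
      fun h => hw (by exact_mod_cast eq_of_beq h)
    rw [if_neg hA, if_neg hB, hlen]
    simp only [hcountW]
    by_cases hd : lines.countP (fun l =>
        PySem.Str.startswith l "[WARNING]" && PySem.Str.isIn "Duplicate identifier" l) = 0 <;>
      by_cases hr : lines.countP (fun l =>
        PySem.Str.startswith l "[WARNING]" && PySem.Str.isIn "Could not fetch resource" l) = 0
    all_goals (
      first
        | rw [if_pos ((hAq (fun w => PySem.Str.isIn "Duplicate identifier" w)).mpr hd)]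
        | rw [if_neg (fun h => hd ((hAq (fun w => PySem.Str.isIn "Duplicate identifier" w)).mp h))]
      first
        | rw [if_pos (show ((lines.countP (fun l =>
              PySem.Str.startswith l "[WARNING]" && PySem.Str.isIn "Duplicate identifier" l) : Int) == 0) = true
              by rw [hd]; rfl)]
        | rw [if_neg (show ¬ ((lines.countP (fun l =>
              PySem.Str.startswith l "[WARNING]" && PySem.Str.isIn "Duplicate identifier" l) : Int) == 0) = true
              from fun h => hd (by exact_mod_cast eq_of_beq h))]
      first
        | rw [if_pos ((hAq (fun w => PySem.Str.isIn "Could not fetch resource" w)).mpr hr)]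
        | rw [if_neg (fun h => hr ((hAq (fun w => PySem.Str.isIn "Could not fetch resource" w)).mp h))]
      first
        | rw [if_pos (show ((lines.countP (fun l =>
              PySem.Str.startswith l "[WARNING]" && PySem.Str.isIn "Could not fetch resource" l) : Int) == 0) = true
              by rw [hr]; rfl)]
        | rw [if_neg (show ¬ ((lines.countP (fun l =>
              PySem.Str.startswith l "[WARNING]" && PySem.Str.isIn "Could not fetch resource" l) : Int) == 0) = true
              from fun h => hr (by exact_mod_cast eq_of_beq h))])

-- ===== VERDICT (by name: the statement is the Claim_ definition above) =====
theorem summarize_pandoc_warnings_py_spec : Claim_equal_summarize_pandoc_warnings_py :=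
  fun stderr _ => pv_main stderr
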